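-- pv_equiv track=rewrite | github.com/phiresky/NetHack-in-Factorio | build/embed_data.py | find_long_string_level
-- ===== SOURCE A (Python) =====
-- def find_long_string_level(content):
--     """Find the minimum '=' level for a Lua long string that won't conflict."""
--     level = 0
--     while level < 10:
--         closing = ']' + '=' * level + ']'
--         if closing not in content:
--             return level
--         level += 1
--     return level
-- ===== SOURCE B (Python) =====
-- def find_long_string_level(content):
--     """Find the minimum '=' level for a Lua long string that won't conflict."""
--     used = set()
--     n = len(content)
--     i = 0
--     while i < n:
--         if content[i] == ']':
--             j = i + 1
--             while j < n and content[j] == '=':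
--                 j += 1
--             if j < n and content[j] == ']':
--                 k = j - i - 1
--                 if k < 10:
--                     used.add(k)
--         i += 1
--     for level in range(10):
--         if level not in used:
--             return level
--     return 10
-- ===== Notes on version B (the rewrite author's own statement) =====
-- stated objective: alternative
-- what changed: Instead of testing each of the ten candidate closing delimiters with its own substring search, B makes one left-to-right scan over content, recording at every closing bracket the length of the maximal equals-sign run that is terminated by another closing bracket, and then returns the smallest level in range(10) not recorded (10 if all are).
import Mathlib
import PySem

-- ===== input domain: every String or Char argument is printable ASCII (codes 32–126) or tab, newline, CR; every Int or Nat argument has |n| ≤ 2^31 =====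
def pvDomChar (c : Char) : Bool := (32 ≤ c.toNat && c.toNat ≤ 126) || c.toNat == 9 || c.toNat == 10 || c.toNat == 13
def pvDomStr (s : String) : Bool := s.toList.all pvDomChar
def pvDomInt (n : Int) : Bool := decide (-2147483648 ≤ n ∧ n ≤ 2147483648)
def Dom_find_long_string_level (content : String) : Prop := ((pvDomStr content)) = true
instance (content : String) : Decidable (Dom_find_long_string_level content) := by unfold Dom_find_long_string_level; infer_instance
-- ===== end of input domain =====

-- B replaces A's ten separate substring searches by one left-to-right scan that records
-- every closing-delimiter level actually occurring in content, then picks the least unused level.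

-- ===== PORT A =====
-- while level < 10: closing = ']'+'='*level+']'; if closing not in content: return level; level += 1
def find_long_string_level_go (cs : List Char) (level : Nat) : Int :=
  if _h : level < 10 then
    if PySem.Chars.isIn (']' :: (List.replicate level '=' ++ [']'])) cs then
      find_long_string_level_go cs (level + 1)
    else (level : Int)
  else (level : Int)
termination_by 10 - level

def find_long_string_level (content : String) : Int :=
  find_long_string_level_go content.toList 0

-- ===== PORT B =====
-- inner while loop: length of the maximal run of '=' at the head of the list
def pvCountEq : List Char → Nat
  | [] => 0
  | c :: rest => if c = '=' then pvCountEq rest + 1 else 0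

-- outer while loop over i: at each ']' record the closed '='-run length (< 10) into the set
def pvScanUsed : List Char → PySem.Set Int → PySem.Set Int
  | [], used => used
  | c :: rest, used =>
      if c = ']' then
        let k := pvCountEq rest
        if (rest.drop k).head? = some ']' then
          if k < 10 then pvScanUsed rest (PySem.Set.add used (k : Int))
          else pvScanUsed rest used
        else pvScanUsed rest used
      else pvScanUsed rest used

-- for level in range(10): if level not in used: return level; return 10
def pvPickLevel (used : PySem.Set Int) : List Int → Int
  | [] => 10
  | l :: rest => if l ∈ used then pvPickLevel used rest else l

def find_long_string_level_alt (content : String) : Int :=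
  pvPickLevel (pvScanUsed content.toList PySem.Set.empty) (PySem.List.pyRange 0 10 1)

-- ===== PRECONDITION & SPEC =====
def Spec_find_long_string_level (content : String) (out : Int) : Prop := out = find_long_string_level_alt content
instance (content : String) (out : Int) : Decidable (Spec_find_long_string_level content out) := by unfold Spec_find_long_string_level; infer_instance

-- ===== CLAIM (what is proved, stated in full; the proofs are below) =====
def Claim_equal_find_long_string_level : Prop := ∀ (content : String), Dom_find_long_string_level content → Spec_find_long_string_level content (find_long_string_level content)

-- ===== LEMMAS AND PROOFS =====

-- the closing delimiter of level k, as a char list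
def pvPat (k : Nat) : List Char := ']' :: (List.replicate k '=' ++ [']'])

-- the suffix pattern '='*k ++ ']' is a prefix of rest iff rest's maximal '='-run is exactly k and is closed by ']'
theorem pvPrefix_iff (rest : List Char) (k : Nat) :
    (List.replicate k '=' ++ [']']) <+: rest ↔ (pvCountEq rest = k ∧ (rest.drop k).head? = some ']') := by
  induction rest generalizing k with
  | nil =>
      cases k <;> simp [pvCountEq]
  | cons c t ih =>
      cases k with
      | zero =>
          constructor
          · intro h
            simp at h
            obtain ⟨rfl, -⟩ := h
            simp [pvCountEq]
          · rintro ⟨-, h2⟩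
            simp at h2
            simp [h2]
      | succ k' =>
          constructor
          · intro h
            rw [List.replicate_succ] at h
            simp only [List.cons_append, List.cons_prefix_cons] at h
            obtain ⟨rfl, h2⟩ := h
            have := (ih k').mp h2
            simp [pvCountEq, this.1, this.2]
          · rintro ⟨h1, h2⟩
            simp only [pvCountEq] at h1
            by_cases hc : c = '='
            · subst hc
              simp at h1
              rw [List.replicate_succ, List.cons_append, List.cons_prefix_cons]
              exact ⟨rfl, (ih k').mpr ⟨h1, by simpa using h2⟩⟩
            · simp [hc] at h1

theorem pvScan_mem (cs : List Char) (used : PySem.Set Int) (k : Nat) (hk : k < 10) :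
    ((k : Int) ∈ pvScanUsed cs used ↔ (k : Int) ∈ used ∨ pvPat k <:+: cs) := by
  induction cs generalizing used with
  | nil => simp [pvScanUsed, pvPat]
  | cons c t ih =>
      by_cases hc : c = ']'
      · subst hc
        have hpre : pvPat k <+: (']' :: t) ↔
            (k = pvCountEq t ∧ (t.drop (pvCountEq t)).head? = some ']') := by
          unfold pvPat
          rw [List.cons_prefix_cons, pvPrefix_iff]
          constructor
          · rintro ⟨-, h1, h2⟩; subst h1; exact ⟨rfl, h2⟩
          · rintro ⟨h1, h2⟩; subst h1; exact ⟨rfl, rfl, h2⟩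
        rw [List.infix_cons_iff, hpre]
        by_cases hh : (t.drop (pvCountEq t)).head? = some ']'
        · by_cases hlt : pvCountEq t < 10
          · simp only [pvScanUsed, if_pos hh, if_pos hlt, if_true]
            rw [ih, PySem.Set.mem_add, Nat.cast_inj]
            constructor
            · rintro ((h | h) | h)
              · exact Or.inl h
              · exact Or.inr (Or.inl ⟨h, hh⟩)
              · exact Or.inr (Or.inr h)
            · rintro (h | ⟨h1, -⟩ | h)
              · exact Or.inl (Or.inl h)
              · exact Or.inl (Or.inr h1)
              · exact Or.inr h
          · simp only [pvScanUsed, if_pos hh, if_neg hlt, if_true]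
            rw [ih]
            constructor
            · rintro (h | h)
              · exact Or.inl h
              · exact Or.inr (Or.inr h)
            · rintro (h | ⟨h1, -⟩ | h)
              · exact Or.inl h
              · omega
              · exact Or.inr h
        · simp only [pvScanUsed, if_neg hh, if_true]
          rw [ih]
          constructor
          · rintro (h | h)
            · exact Or.inl h
            · exact Or.inr (Or.inr h)
          · rintro (h | ⟨h1, h2⟩ | h)
            · exact Or.inl h
            · exact absurd h2 hh
            · exact Or.inr h
      · simp only [pvScanUsed, if_neg hc]
        rw [ih, List.infix_cons_iff]
        have hnp : ¬ pvPat k <+: (c :: t) := by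
          unfold pvPat
          rw [List.cons_prefix_cons]
          rintro ⟨h, -⟩
          exact hc h.symm
        tauto

-- pointwise: A's substring test at level l agrees with membership in B's scanned set
theorem pvPointwise (cs : List Char) (l : Nat) (hl : l < 10) :
    (PySem.Chars.isIn (pvPat l) cs = true ↔ (l : Int) ∈ pvScanUsed cs PySem.Set.empty) := by
  rw [PySem.Chars.isIn_iff_infix, pvScan_mem cs PySem.Set.empty l hl]
  simp [PySem.Set.empty]

theorem pvLoop_eq (cs : List Char) (level : Nat) (hle : level ≤ 10) :
    find_long_string_level_go cs level =
      pvPickLevel (pvScanUsed cs PySem.Set.empty) (PySem.List.pyRange (level : Int) 10 1) := by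
  by_cases h : level < 10
  · have hcons : PySem.List.pyRange (level : Int) 10 1 =
        (level : Int) :: PySem.List.pyRange ((level : Int) + 1) 10 1 :=
      PySem.List.pyRange_one_cons (by exact_mod_cast h)
    rw [hcons]
    unfold find_long_string_level_go
    rw [dif_pos h]
    have hpt := pvPointwise cs level h
    unfold pvPat at hpt
    by_cases hm : (level : Int) ∈ pvScanUsed cs PySem.Set.empty
    · rw [if_pos (hpt.mpr hm)]
      simp only [pvPickLevel, if_pos hm]
      have := pvLoop_eq cs (level + 1) (by omega)
      rwa [show ((level + 1 : Nat) : Int) = (level : Int) + 1 by push_cast; ring] at this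
    · rw [if_neg (fun hcontra => hm (hpt.mp hcontra))]
      simp only [pvPickLevel, if_neg hm]
  · have h10 : level = 10 := by omega
    subst h10
    unfold find_long_string_level_go
    rw [dif_neg (by omega)]
    rw [show ((10 : Nat) : Int) = (10 : Int) by norm_num]
    rw [show PySem.List.pyRange (10 : Int) 10 1 = [] from by decide]
    simp [pvPickLevel]
termination_by 10 - level

-- ===== VERDICT (by name: the statement is the Claim_ definition above) =====
theorem find_long_string_level_spec : Claim_equal_find_long_string_level := by
  intro content _
  unfold Spec_find_long_string_level find_long_string_level find_long_string_level_alt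
  simpa using pvLoop_eq content.toList 0 (by omega)
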